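-- pv_equiv track=rewrite | github.com/RainTreeCrow/NJU-CS-2019-23 | 19-20-1 SICP/Lab/lab03/lab02-04-witness.py | wit_help
-- ===== SOURCE A (Python) =====
-- def wit_help(l, tallest, i):
--     if(i < len(l)):
--         if(l[i] > tallest):
--             return wit_help(l, l[i], i + 1) + 1;
--         else:
--             return wit_help(l, tallest, i + 1);
--     else:
--         return 0
-- ===== SOURCE B (Python) =====
-- def wit_help(l, tallest, i):
--     current = tallest
--     count = 0
--     for j in range(i, len(l)):
--         if l[j] > current:
--             count += 1
--             current = l[j]
--     return count
-- ===== Notes on version B (the rewrite author's own statement) =====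
-- stated objective: simpler
-- what changed: Replaces the recursion with a single iterative loop over range(i, len(l)) that threads a running maximum and a counter instead of rebuilding the answer from recursive calls.
import Mathlib
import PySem

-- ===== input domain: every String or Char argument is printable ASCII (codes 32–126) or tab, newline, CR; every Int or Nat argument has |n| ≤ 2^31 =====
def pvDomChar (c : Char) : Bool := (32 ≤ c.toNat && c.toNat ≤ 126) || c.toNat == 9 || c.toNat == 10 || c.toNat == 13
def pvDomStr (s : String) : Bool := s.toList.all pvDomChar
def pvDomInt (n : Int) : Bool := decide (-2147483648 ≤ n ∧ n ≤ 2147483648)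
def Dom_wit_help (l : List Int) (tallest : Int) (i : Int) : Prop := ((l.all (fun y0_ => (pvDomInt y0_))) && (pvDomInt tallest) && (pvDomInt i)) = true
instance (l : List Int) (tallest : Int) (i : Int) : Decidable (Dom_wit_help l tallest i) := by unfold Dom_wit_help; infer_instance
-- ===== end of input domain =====

-- B replaces A's recursion by a single iterative loop threading a running maximum and a counter (objective: simpler).

-- ===== PORT A =====
-- recursive, exactly A's structure; the 'none' branch is an IndexError, excluded by Pre_
def wit_help (l : List Int) (tallest : Int) (i : Int) : Int :=
  if _h : i < (l.length : Int) then
    match PySem.List.pyGet? l i with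
    | some x =>
        if x > tallest then wit_help l x (i + 1) + 1
        else wit_help l tallest (i + 1)
    | none => 0   -- IndexError (i < -len); outside Pre_
  else 0
termination_by ((l.length : Int) - i).toNat
decreasing_by all_goals omega

-- ===== PORT B =====
-- loop 'for j in range(i, len(l))' with state (current, count); l[j] total under Pre_
def wit_help_alt (l : List Int) (tallest : Int) (i : Int) : Int :=
  ((PySem.List.pyRange i (l.length : Int) 1).foldl
    (fun (st : Int × Int) j =>
      if PySem.List.pyGetD l j 0 > st.1 then (PySem.List.pyGetD l j 0, st.2 + 1) else st)
    (tallest, 0)).2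

-- ===== PRECONDITION & SPEC =====
-- Pre_ excludes exactly the inputs where Python A raises IndexError (first index i below -len(l)).
def Pre_wit_help (l : List Int) (tallest : Int) (i : Int) : Prop := -(l.length : Int) ≤ i
instance (l : List Int) (tallest : Int) (i : Int) : Decidable (Pre_wit_help l tallest i) := by unfold Pre_wit_help; infer_instance
def pvWitness_wit_help : List Int × Int × Int := ([3, 1, 4, 1, 5], 2, 0)

def Spec_wit_help (l : List Int) (tallest : Int) (i : Int) (out : Int) : Prop := out = wit_help_alt l tallest i
instance (l : List Int) (tallest : Int) (i : Int) (out : Int) : Decidable (Spec_wit_help l tallest i out) := by unfold Spec_wit_help; infer_instance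

-- ===== CLAIM (what is proved, stated in full; the proofs are below) =====
def Claim_equal_wit_help : Prop := ∀ (l : List Int) (tallest : Int) (i : Int), Dom_wit_help l tallest i → Pre_wit_help l tallest i → Spec_wit_help l tallest i (wit_help l tallest i)

-- ===== LEMMAS AND PROOFS =====

-- B's loop from index i, with accumulated count c, computes A's recursion plus c.
theorem wit_help_loop (l : List Int) (i t c : Int) (hlo : -(l.length : Int) ≤ i) :
    ((PySem.List.pyRange i (l.length : Int) 1).foldl
      (fun (st : Int × Int) j =>
        if PySem.List.pyGetD l j 0 > st.1 then (PySem.List.pyGetD l j 0, st.2 + 1) else st)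
      (t, c)).2 = wit_help l t i + c := by
  by_cases h : i < (l.length : Int)
  · obtain ⟨x, hx⟩ : ∃ x, PySem.List.pyGet? l i = some x := by
      rcases lt_or_ge i 0 with hneg | hpos
      · have hk : i = -(((-i).toNat : Nat) : Int) := by omega
        rw [hk, PySem.List.pyGet?_neg_natCast l (-i).toNat (by omega) (by omega)]
        exact ⟨_, List.getElem?_eq_getElem (by omega)⟩
      · rw [PySem.List.pyGet?_of_nonneg l hpos]
        exact ⟨_, List.getElem?_eq_getElem (by omega)⟩
    have hd : PySem.List.pyGetD l i 0 = x := by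
      simp [PySem.List.pyGetD, hx]
    rw [PySem.List.pyRange_one_cons h, List.foldl_cons]
    rw [wit_help]
    simp only [h, dif_pos, hx, hd]
    by_cases hgt : x > t
    · simp only [if_pos hgt]
      rw [wit_help_loop l (i + 1) x (c + 1) (by omega)]
      ring
    · simp only [if_neg hgt]
      rw [wit_help_loop l (i + 1) t c (by omega)]
  · have : PySem.List.pyRange i (l.length : Int) 1 = [] := by
      simp [PySem.List.pyRange]; omega
    rw [this]
    rw [wit_help]
    simp [h]
termination_by ((l.length : Int) - i).toNat
decreasing_by all_goals omega

-- ===== VERDICT (by name: the statement is the Claim_ definition above) =====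
theorem wit_help_spec : Claim_equal_wit_help := by
  intro l tallest i _ hpre
  unfold Spec_wit_help wit_help_alt
  rw [wit_help_loop l i tallest 0 hpre]
  omega
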